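-- pv_equiv track=rewrite | github.com/thogood212/Coding_Test | programmers/둘만의암호.py | solution
-- ===== SOURCE A (Python) =====
-- def solution(s, skip, index):
--     answer = ''
--     skip_list =[]
--     letters = []
--     letter=''
--     for i in range(len(skip)):
--         skip_list.append(skip[i])
--     for i in range(ord('a'),ord('z')+1):
--         if chr(i) in skip_list:
--             pass
--         else:
--             letters.append(chr(i))
--
--     for i in range(len(s)):
--         i = s[i]
--         letter += letters[(letters.index(i)+index)%len(letters)]
--     answer = letter
--
--     return answer
-- ===== SOURCE B (Python) =====
-- def solution(s, skip, index):
--     # rank/select arithmetic: no filtered-alphabet lookups, no .index, no table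
--     banned = [c for c in "abcdefghijklmnopqrstuvwxyz" if c in skip]
--     n = 26 - len(banned)
--     out = []
--     for c in s:
--         k = (ord(c) - 97 - len([b for b in banned if b < c]) + index) % n
--         for b in banned:
--             if ord(b) - 97 <= k:
--                 k += 1
--         out.append(chr(97 + k))
--     return ''.join(out)
-- ===== Notes on version B (the rewrite author's own statement) =====
-- stated objective: alternative
-- what changed: B never builds or searches the filtered alphabet: for each character it computes its cipher position arithmetically as rank = ord(c)-97 minus the count of smaller skipped letters, shifts it mod n, and converts the position back to a letter by an offset-insertion select over the sorted skipped letters (k += 1 for each skipped letter at position <= k), so A's per-character list.index scan of the 24ish-element letters list is replaced by rank/select arithmetic over the (usually tiny) banned list.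
import Mathlib
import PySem

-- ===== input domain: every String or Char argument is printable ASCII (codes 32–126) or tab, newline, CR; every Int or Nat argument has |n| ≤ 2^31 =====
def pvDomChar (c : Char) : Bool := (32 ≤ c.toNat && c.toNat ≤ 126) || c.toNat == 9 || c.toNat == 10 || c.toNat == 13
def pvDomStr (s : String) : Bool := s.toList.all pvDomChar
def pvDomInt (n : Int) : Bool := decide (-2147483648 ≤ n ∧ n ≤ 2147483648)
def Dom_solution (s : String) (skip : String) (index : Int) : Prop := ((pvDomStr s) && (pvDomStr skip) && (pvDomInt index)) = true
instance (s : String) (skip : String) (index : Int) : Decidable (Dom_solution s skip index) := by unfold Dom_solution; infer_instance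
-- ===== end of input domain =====

-- B replaces A's per-character list.index scan of the filtered alphabet by rank/select
-- arithmetic over the skipped letters (no filtered-alphabet list, no lookup table).

-- ===== PORT A =====
-- the index (letters.index(c)+index)%len(letters) is always in range when index() succeeds, so pyGetD's default is unreachable
def solution (s : String) (skip : String) (index : Int) : String :=
  let skipList : List Char := skip.toList  -- first loop copies skip's characters in order
  let letters : List Char :=
    (PySem.List.pyRange 97 123 1).foldl
      (fun acc i => if skipList.contains (Char.ofNat i.toNat) then acc else acc ++ [Char.ofNat i.toNat]) []
  s.toList.foldl (fun letter c =>
      (PySem.List.index? letters c).elim letter   -- none = ValueError in Python: excluded by Pre_solution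
        (fun j => letter ++ String.ofList [PySem.List.pyGetD letters (PySem.Int.mod ((j : Int) + index) (letters.length : Int)) 'a']))
    ""

-- ===== PORT B =====
-- per character: rank = ord(c)-97 - #(smaller banned), shift mod n, then select by offset insertion
def solution_alt (s : String) (skip : String) (index : Int) : String :=
  let banned : List Char := "abcdefghijklmnopqrstuvwxyz".toList.filter (fun c => skip.toList.contains c)
  let n : Int := 26 - (banned.length : Int)
  String.ofList (s.toList.map (fun c =>
    let k : Int := PySem.Int.mod (((c.toNat : Int) - 97 - ((banned.filter (fun b => b < c)).length : Int)) + index) n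
    Char.ofNat (97 + (banned.foldl (fun j b => if ((b.toNat : Int) - 97) ≤ j then j + 1 else j) k)).toNat))

-- ===== PRECONDITION & SPEC =====
-- Pre_ excludes exactly the inputs where A raises (ValueError from letters.index: some char of s is not a
-- lowercase letter outside skip).
def Pre_solution (s : String) (skip : String) (index : Int) : Prop :=
  s.toList.all (fun c => ('a' ≤ c && c ≤ 'z') && !(skip.toList.contains c)) = true
instance (s : String) (skip : String) (index : Int) : Decidable (Pre_solution s skip index) := by
  unfold Pre_solution; infer_instance
def pvWitness_solution : String × String × Int := ("abc", "xy", 3)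
def Spec_solution (s : String) (skip : String) (index : Int) (out : String) : Prop := out = solution_alt s skip index
instance (s : String) (skip : String) (index : Int) (out : String) : Decidable (Spec_solution s skip index out) := by unfold Spec_solution; infer_instance

-- ===== CLAIM (what is proved, stated in full; the proofs are below) =====
def Claim_equal_solution : Prop := ∀ (s : String) (skip : String) (index : Int), Dom_solution s skip index → Pre_solution s skip index → Spec_solution s skip index (solution s skip index)

-- ===== LEMMAS AND PROOFS =====

def pvG (i : Nat) : Char := Char.ofNat (97 + i)

-- A's skip-filter loop is a filter of the mapped range
theorem foldl_skip (L : List Int) (P : Char → Bool) (acc : List Char) :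
    L.foldl (fun acc i => if P (Char.ofNat i.toNat) then acc else acc ++ [Char.ofNat i.toNat]) acc
      = acc ++ (L.map (fun i => Char.ofNat i.toNat)).filter (fun c => !P c) := by
  induction L generalizing acc with
  | nil => simp
  | cons x xs ih =>
    simp only [List.foldl_cons, List.map_cons, List.filter_cons]
    by_cases h : P (Char.ofNat x.toNat)
    · simp [h, ih]
    · simp [h, ih]

theorem alphabet_map :
    (PySem.List.pyRange 97 123 1).map (fun i => Char.ofNat i.toNat)
      = "abcdefghijklmnopqrstuvwxyz".toList := by decide

-- A's letters list equals the filtered alphabet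
theorem letters_eq (skip : String) :
    (PySem.List.pyRange 97 123 1).foldl
      (fun acc i => if skip.toList.contains (Char.ofNat i.toNat) then acc else acc ++ [Char.ofNat i.toNat]) []
      = "abcdefghijklmnopqrstuvwxyz".toList.filter (fun c => !(skip.toList.contains c)) := by
  rw [foldl_skip, alphabet_map, List.nil_append]

theorem alpha_eq : "abcdefghijklmnopqrstuvwxyz".toList = (List.range 26).map pvG := by decide

theorem char_le_iff (a c : Char) : a ≤ c ↔ a.toNat ≤ c.toNat := by
  rw [Char.le_def, UInt32.le_iff_toNat_le]; rfl

theorem char_lt_iff (a c : Char) : a < c ↔ a.toNat < c.toNat := by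
  rw [Char.lt_def, UInt32.lt_iff_toNat_lt]; rfl

theorem pvG_toNat (i : Nat) (h : i < 26) : (pvG i).toNat = 97 + i := by
  rw [pvG, Char.toNat_ofNat, if_pos (Or.inl (by omega))]

theorem mem_alphabet (c : Char) : c ∈ "abcdefghijklmnopqrstuvwxyz".toList ↔ ('a' ≤ c ∧ c ≤ 'z') := by
  rw [alpha_eq, List.mem_map]
  constructor
  · rintro ⟨k, hk, rfl⟩
    rw [List.mem_range] at hk
    rw [char_le_iff, char_le_iff, pvG_toNat k hk]
    constructor <;> simp <;> omega
  · rintro ⟨h1, h2⟩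
    rw [char_le_iff] at h1
    rw [char_le_iff] at h2
    have h97 : (97 : Nat) ≤ c.toNat := h1
    have h122 : c.toNat ≤ 122 := h2
    refine ⟨c.toNat - 97, List.mem_range.mpr (by omega), ?_⟩
    rw [pvG]
    have : 97 + (c.toNat - 97) = c.toNat := by omega
    rw [this, Char.ofNat_toNat]

-- countP split over a Bool test
theorem pv_countP_split (p q : Char → Bool) (l : List Char) :
    l.countP (fun a => p a && q a) + l.countP (fun a => p a && !q a) = l.countP p := by
  induction l with
  | nil => simp
  | cons x t ih =>
    by_cases hp : p x <;> by_cases hq : q x <;>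
      simp [List.countP_cons, hp, hq] <;> omega

theorem pv_countP_range (n r : Nat) :
    (List.range n).countP (fun i => decide (i < r)) = min r n := by
  induction n with
  | zero => simp
  | succ n ih =>
    rw [List.range_succ, List.countP_append, ih]
    by_cases h : n < r <;> simp [h] <;> omega

-- first index in a strictly sorted list = number of smaller elements
theorem pv_idxOf_sorted (l : List Char) (hl : l.Pairwise (· < ·)) (c : Char) (hc : c ∈ l) :
    List.idxOf? c l = some (l.countP (fun x => decide (x < c))) := by
  induction l with
  | nil => cases hc
  | cons a t ih =>
    rcases List.pairwise_cons.mp hl with ⟨ha, ht⟩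
    rw [List.idxOf?_cons]
    by_cases hac : a = c
    · subst hac
      have h0 : t.countP (fun x => decide (x < a)) = 0 := by
        rw [List.countP_eq_zero]
        intro x hx
        simp only [decide_eq_true_eq]
        exact fun hlt => absurd (ha x hx) (by exact fun h => lt_asymm hlt h)
      simp [List.countP_cons, h0]
    · have hct : c ∈ t := by cases hc with
        | head => exact absurd rfl hac
        | tail _ h => exact h
      have hbeq : (a == c) = false := by simp [hac]
      rw [hbeq, ih ht hct]
      have hlt : a < c := ha c hct
      simp [List.countP_cons, hlt]

-- select: the offset-insertion fold over the banned positions reads off the k-th allowed position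
theorem pv_select (m : Nat) (q : Nat → Bool) (k : Nat) :
    ((List.range m).filter q).foldl (fun j b => if b ≤ j then j + 1 else j) k
      = ((List.range m).filter (fun i => !q i)).getD k (k + ((List.range m).filter q).length) := by
  induction m generalizing k with
  | zero => simp
  | succ m ih =>
    have hlen : ((List.range m).filter q).length + ((List.range m).filter (fun i => !q i)).length
        = m := by
      have := List.length_eq_length_filter_add (l := List.range m) q
      simp only [List.length_range] at this
      omega
    rw [List.range_succ, List.filter_append, List.filter_append, List.foldl_append]
    by_cases hq : q m
    · have h1 : List.filter q [m] = [m] := by simp [hq]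
      have h2 : List.filter (fun i => !q i) [m] = [] := by simp [hq]
      rw [h1, h2, List.append_nil, List.foldl_cons, List.foldl_nil, ih]
      set C := (List.range m).filter (fun i => !q i) with hC
      set B := (List.range m).filter q with hB
      by_cases hk : k < C.length
      · rw [List.getD_eq_getElem C _ hk, List.getD_eq_getElem C _ hk]
        have hmem : C[k] ∈ C := List.getElem_mem _
        have hlt : C[k] < m := by
          have hmem2 : C[k] ∈ (List.range m).filter (fun i => !q i) := by
            rw [← hC]; exact List.getElem_mem _
          exact List.mem_range.mp (List.mem_filter.mp hmem2).1
        rw [if_neg (by omega)]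
      · push_neg at hk
        rw [List.getD_eq_default C _ hk, List.getD_eq_default C _ hk,
          if_pos (by omega)]
        simp [List.length_append]
        omega
    · have h1 : List.filter q [m] = [] := by simp [hq]
      have h2 : List.filter (fun i => !q i) [m] = [m] := by simp [hq]
      rw [h1, h2, List.foldl_nil, List.append_nil, ih]
      set C := (List.range m).filter (fun i => !q i) with hC
      set B := (List.range m).filter q with hB
      by_cases hk : k < C.length
      · rw [List.getD_eq_getElem C _ hk, List.getD_eq_getElem _ _ (by simp [List.length_append]; omega)]
        rw [List.getElem_append_left hk]
      · push_neg at hk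
        rw [List.getD_eq_default C _ hk]
        by_cases hk2 : k < (C ++ [m]).length
        · have hkeq : k = C.length := by simp [List.length_append] at hk2; omega
          rw [List.getD_eq_getElem _ _ hk2]
          have : (C ++ [m])[k] = m := by
            rw [List.getElem_append_right (by omega)]
            simp [hkeq]
          rw [this]
          omega
        · push_neg at hk2
          rw [List.getD_eq_default _ _ hk2]

-- the Int-accumulator fold of the port is the Nat fold, cast
theorem pv_foldl_cast (bs : List Nat) (k : Nat) :
    bs.foldl (fun (j : Int) (i : Nat) => if (i : Int) ≤ j then j + 1 else j) (k : Int)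
      = ((bs.foldl (fun j b => if b ≤ j then j + 1 else j) k : Nat) : Int) := by
  induction bs generalizing k with
  | nil => rfl
  | cons b t ih =>
    simp only [List.foldl_cons]
    by_cases h : b ≤ k
    · rw [if_pos (by exact_mod_cast h), if_pos h]
      have : ((k : Int) + 1) = ((k + 1 : Nat) : Int) := by push_cast; ring
      rw [this, ih]
    · rw [if_neg (by exact_mod_cast h), if_neg h, ih]

theorem pv_filterMap_eq_map {α β : Type} (cs : List α) (F : α → Option β) (G : α → β)
    (h : ∀ c ∈ cs, F c = some (G c)) : cs.filterMap F = cs.map G := by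
  induction cs with
  | nil => rfl
  | cons x t ih =>
    rw [List.filterMap_cons, h x (by simp), List.map_cons,
      ih (fun c hc => h c (by simp [hc]))]

-- A's accumulating string loop, characterised
theorem string_fold (L : List Char) (g : Int → Char) (cs : List Char) (acc : String) :
    cs.foldl (fun letter c =>
        (PySem.List.index? L c).elim letter
          (fun j => letter ++ String.ofList [g (j : Int)])) acc
      = acc ++ String.ofList (cs.filterMap
          (fun c => Option.map (fun j : Nat => g (j : Int)) (PySem.List.index? L c))) := by
  induction cs generalizing acc with
  | nil => simp
  | cons c cs ih =>
    cases hidx : PySem.List.index? L c with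
    | none =>
      simp only [List.foldl_cons, List.filterMap_cons, hidx, Option.map_none, Option.elim_none]
      exact ih acc
    | some j =>
      simp only [List.foldl_cons, List.filterMap_cons, hidx, Option.map_some, Option.elim_some]
      rw [ih]
      rw [String.append_assoc, ← String.ofList_append]
      rfl

theorem pv_getD_map (l : List Nat) (k : Nat) (d : Char) (dn : Nat) (h : k < l.length) :
    (l.map pvG).getD k d = pvG (l.getD k dn) := by
  rw [List.getD_eq_getElem _ _ (by simpa using h), List.getD_eq_getElem _ _ h, List.getElem_map]

-- per-character agreement: rank/select arithmetic computes letters[(letters.index(c)+index) % n]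
theorem pv_char_eq (skip : String) (index : Int) (c : Char)
    (h1 : 'a' ≤ c) (h2 : c ≤ 'z') (h3 : ¬ c ∈ skip.toList) :
    Option.map (fun j : Nat =>
        PySem.List.pyGetD ("abcdefghijklmnopqrstuvwxyz".toList.filter (fun x => !(skip.toList.contains x)))
          (PySem.Int.mod ((j : Int) + index)
            ((("abcdefghijklmnopqrstuvwxyz".toList.filter (fun x => !(skip.toList.contains x))).length : Int)))
          'a')
      (PySem.List.index?
        ("abcdefghijklmnopqrstuvwxyz".toList.filter (fun x => !(skip.toList.contains x))) c)
      = some (Char.ofNat (97 +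
          (("abcdefghijklmnopqrstuvwxyz".toList.filter (fun x => skip.toList.contains x)).foldl
            (fun j b => if ((b.toNat : Int) - 97) ≤ j then j + 1 else j)
            (PySem.Int.mod (((c.toNat : Int) - 97 -
              ((("abcdefghijklmnopqrstuvwxyz".toList.filter (fun x => skip.toList.contains x)).filter
                (fun b => b < c)).length : Int)) + index)
              (26 - (("abcdefghijklmnopqrstuvwxyz".toList.filter (fun x => skip.toList.contains x)).length : Int))))).toNat) := by
  set letters := "abcdefghijklmnopqrstuvwxyz".toList.filter (fun x => !(skip.toList.contains x)) with hLdef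
  set banned := "abcdefghijklmnopqrstuvwxyz".toList.filter (fun x => skip.toList.contains x) with hBdef
  have ht97 : 97 ≤ c.toNat := (char_le_iff 'a' c).mp h1
  have ht122 : c.toNat ≤ 122 := (char_le_iff c 'z').mp h2
  have hLmap : letters = ((List.range 26).filter (fun i => !(skip.toList.contains (pvG i)))).map pvG := by
    rw [hLdef, alpha_eq, List.filter_map]
    rfl
  have hBmap : banned = ((List.range 26).filter (fun i => skip.toList.contains (pvG i))).map pvG := by
    rw [hBdef, alpha_eq, List.filter_map]
    rfl
  have hmemL : c ∈ letters := by
    rw [hLdef]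
    exact List.mem_filter.mpr ⟨(mem_alphabet c).mpr ⟨h1, h2⟩, by simp [h3]⟩
  have halpha : ("abcdefghijklmnopqrstuvwxyz".toList).Pairwise (· < ·) := by decide
  have hLsort : letters.Pairwise (· < ·) := List.Pairwise.sublist List.filter_sublist halpha
  have hidx : PySem.List.index? letters c
      = some (letters.countP (fun x => decide (x < c))) := pv_idxOf_sorted letters hLsort c hmemL
  -- rank: index in letters + count of smaller banned = ord c - 97
  have hrank : letters.countP (fun x => decide (x < c)) + banned.countP (fun x => decide (x < c))
      = c.toNat - 97 := by
    rw [hLdef, hBdef, List.countP_filter, List.countP_filter, add_comm,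
      pv_countP_split (fun x => decide (x < c)) (fun x => skip.toList.contains x)
        ("abcdefghijklmnopqrstuvwxyz".toList), alpha_eq, List.countP_map]
    rw [List.countP_congr (q := fun i => decide (i < c.toNat - 97)) ?_]
    · rw [pv_countP_range]
      omega
    · intro i hi
      have hi26 : i < 26 := List.mem_range.mp hi
      simp only [Function.comp_apply, decide_eq_true_eq]
      rw [char_lt_iff, pvG_toNat i hi26]
      omega
  have hlen26 : banned.length + letters.length = 26 := by
    rw [hBdef, hLdef, ← List.length_eq_length_filter_add]
    decide
  have hpos : 0 < letters.length := List.length_pos_of_mem hmemL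
  -- the two mod expressions are the same integer
  have hcount : ((banned.filter (fun b => b < c)).length : Int)
      = (banned.countP (fun x => decide (x < c)) : Int) := by
    rw [List.countP_eq_length_filter]
  have hargeq : ((c.toNat : Int) - 97 - ((banned.filter (fun b => b < c)).length : Int)) + index
      = ((letters.countP (fun x => decide (x < c)) : Int)) + index := by
    rw [hcount]; omega
  have hdiveq : (26 : Int) - (banned.length : Int) = (letters.length : Int) := by omega
  rw [hidx, Option.map_some, hargeq, hdiveq]
  set kA := PySem.Int.mod ((letters.countP (fun x => decide (x < c)) : Int) + index)
    (letters.length : Int) with hkA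
  have hk0 : 0 ≤ kA := PySem.Int.mod_nonneg _ (by exact_mod_cast hpos)
  have hklt : kA < (letters.length : Int) := PySem.Int.mod_lt _ (by exact_mod_cast hpos)
  have hkNcast : kA = ((kA.toNat : Nat) : Int) := (Int.toNat_of_nonneg hk0).symm
  set kN := kA.toNat with hkN
  have hkNlt : kN < letters.length := by omega
  set BP := (List.range 26).filter (fun i => skip.toList.contains (pvG i)) with hBP
  set LP := (List.range 26).filter (fun i => !(skip.toList.contains (pvG i))) with hLP
  have hLPlen : LP.length = letters.length := by rw [hLmap, List.length_map]
  have hkLP : kN < LP.length := by omega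
  -- B's fold over banned = Nat fold overer the banned positions, read off by select
  have hcongr := PySem.List.foldl_congr_mem BP
    (fun (x : Int) (i : Nat) => if ((pvG i).toNat : Int) - 97 ≤ x then x + 1 else x)
    (fun (x : Int) (i : Nat) => if (i : Int) ≤ x then x + 1 else x) kA (by
      intro acc i hi
      have hi26 : i < 26 := by
        rw [hBP] at hi
        exact List.mem_range.mp (List.mem_filter.mp hi).1
      simp only [pvG_toNat i hi26]
      have h97 : ((97 + i : Nat) : Int) - 97 = (i : Int) := by push_cast; ring
      rw [h97])
  have hfold : banned.foldl (fun j b => if ((b.toNat : Int) - 97) ≤ j then j + 1 else j) kA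
      = ((LP.getD kN (kN + BP.length) : Nat) : Int) := by
    rw [hBmap]
    simp only [List.foldl_map]
    rw [hcongr, hkNcast, pv_foldl_cast, hBP, hLP]
    rw [pv_select 26 (fun i => skip.toList.contains (pvG i)) kN]
  -- A's char is letters[kN], read through the position list
  have hA : PySem.List.pyGetD letters kA 'a' = pvG (LP.getD kN (kN + BP.length)) := by
    rw [hkNcast, PySem.List.pyGetD_natCast, hLmap]
    exact pv_getD_map LP kN 'a' (kN + BP.length) hkLP
  rw [hA, hfold]
  have hx : ((97 : Int) + ((LP.getD kN (kN + BP.length) : Nat) : Int)).toNat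
      = 97 + LP.getD kN (kN + BP.length) := by omega
  rw [hx]
  rfl

-- ===== VERDICT (by name: the statement is the Claim_ definition above) =====
theorem solution_spec : Claim_equal_solution := by
  intro s skip index hdom hpre
  unfold Spec_solution solution solution_alt
  dsimp only
  rw [letters_eq skip]
  rw [string_fold ("abcdefghijklmnopqrstuvwxyz".toList.filter (fun x => !(skip.toList.contains x)))
    (fun j => PySem.List.pyGetD
      ("abcdefghijklmnopqrstuvwxyz".toList.filter (fun x => !(skip.toList.contains x))) 
      (PySem.Int.mod (j + index)
        ((("abcdefghijklmnopqrstuvwxyz".toList.filter (fun x => !(skip.toList.contains x))).length : Int))) 'a')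
    s.toList ""]
  rw [pv_filterMap_eq_map s.toList _
    (fun c => Char.ofNat (97 +
      (("abcdefghijklmnopqrstuvwxyz".toList.filter (fun x => skip.toList.contains x)).foldl
        (fun j b => if ((b.toNat : Int) - 97) ≤ j then j + 1 else j)
        (PySem.Int.mod (((c.toNat : Int) - 97 -
          ((("abcdefghijklmnopqrstuvwxyz".toList.filter (fun x => skip.toList.contains x)).filter
            (fun b => b < c)).length : Int)) + index)
          (26 - (("abcdefghijklmnopqrstuvwxyz".toList.filter (fun x => skip.toList.contains x)).length : Int))))).toNat)
    ?_]
  · simp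
  · intro c hc
    have h := List.all_eq_true.mp hpre c hc
    simp only [Bool.and_eq_true, decide_eq_true_eq, Bool.not_eq_true', List.contains_eq_mem,
      decide_eq_false_iff_not] at h
    exact pv_char_eq skip index c h.1.1 h.1.2 h.2
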